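-- pv_equiv track=rewrite | github.com/dnjs2721/Algorithm_Python | Programmers/점 찍기.py | solution
-- ===== SOURCE A (Python) =====
-- def solution(k, d):
--     answer = 0
--
--     for i in range(0, d+1):
--         x = k * i
--         for j in range(0, d+1):
--             y = k * j
--             if (x == d and y == 0) or (x == 0 and y == d):
--                 answer += 1
--             if x < d and y < d:
--                 if x + y <= (d-1)*2 -1:
--                     answer += 1
--
--     return answer
-- ===== SOURCE B (Python) =====
-- def solution(k, d):
--     if d < 0:
--         return 0
--
--     def count_le(m):  # number of j in [0, d] with k*j <= m
--         if k == 0: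
--             return d + 1 if m >= 0 else 0
--         if k > 0:
--             hi = m // k
--             return min(hi, d) + 1 if hi >= 0 else 0
--         lo = -((-m) // k)  # ceil(m / k), k < 0
--         if lo <= 0:
--             return d + 1
--         return d - lo + 1 if lo <= d else 0
--
--     def count_eq(c):  # number of j in [0, d] with k*j == c
--         if k == 0:
--             return d + 1 if c == 0 else 0
--         return 1 if c % k == 0 and 0 <= c // k <= d else 0
--
--     answer = 0
--     for i in range(d + 1):
--         x = k * i
--         if x == d:
--             answer += count_eq(0)
--         if x == 0 and d != 0:
--             answer += count_eq(d)
--         if x < d: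
--             answer += count_le(min(d - 1, 2 * d - 3 - x))
--     return answer
-- ===== Notes on version B (the rewrite author's own statement) =====
-- stated objective: faster
-- what changed: Replaced A's O(d^2) double loop over (i,j) with a single loop over i that counts the valid j's in O(1) via closed-form threshold/divisibility counting (floor/ceil division).
import Mathlib
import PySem

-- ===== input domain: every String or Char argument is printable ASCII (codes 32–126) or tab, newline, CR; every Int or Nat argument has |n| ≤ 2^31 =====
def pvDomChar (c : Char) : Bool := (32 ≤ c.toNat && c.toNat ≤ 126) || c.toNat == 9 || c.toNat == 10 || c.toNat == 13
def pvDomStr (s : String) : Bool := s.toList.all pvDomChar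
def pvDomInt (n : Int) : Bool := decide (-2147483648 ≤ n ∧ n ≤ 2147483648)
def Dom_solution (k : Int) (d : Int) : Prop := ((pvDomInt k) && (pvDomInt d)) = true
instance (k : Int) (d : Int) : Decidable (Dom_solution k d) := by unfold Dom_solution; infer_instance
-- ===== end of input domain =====

-- B replaces A's O(d^2) double loop by a single loop over i whose inner count over j
-- is computed in closed form (threshold counting); objective: faster.

-- ===== PORT A =====
def solution (k : Int) (d : Int) : Int :=
  (PySem.List.pyRange 0 (d + 1) 1).foldl (fun answer i =>
    let x := k * i
    (PySem.List.pyRange 0 (d + 1) 1).foldl (fun a j =>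
      let y := k * j
      let a := if (x = d ∧ y = 0) ∨ (x = 0 ∧ y = d) then a + 1 else a
      if x < d ∧ y < d then (if x + y ≤ (d - 1) * 2 - 1 then a + 1 else a) else a)
      answer) 0

-- ===== PORT B =====
-- number of j in [0, d] with k*j <= m (closed form)
def countLeB (k : Int) (d : Int) (m : Int) : Int :=
  if k = 0 then (if 0 ≤ m then d + 1 else 0)
  else if 0 < k then
    if 0 ≤ PySem.Int.floordiv m k then min (PySem.Int.floordiv m k) d + 1 else 0
  else
    if -(PySem.Int.floordiv (-m) k) ≤ 0 then d + 1
    else if -(PySem.Int.floordiv (-m) k) ≤ d then d - -(PySem.Int.floordiv (-m) k) + 1 else 0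

-- number of j in [0, d] with k*j == c (closed form)
def countEqB (k : Int) (d : Int) (c : Int) : Int :=
  if k = 0 then (if c = 0 then d + 1 else 0)
  else if PySem.Int.mod c k = 0 ∧ 0 ≤ PySem.Int.floordiv c k ∧ PySem.Int.floordiv c k ≤ d then 1
  else 0

def solution_alt (k : Int) (d : Int) : Int :=
  if d < 0 then 0
  else
    (PySem.List.pyRange 0 (d + 1) 1).foldl (fun answer i =>
      let x := k * i
      let answer := if x = d then answer + countEqB k d 0 else answer
      let answer := if x = 0 ∧ d ≠ 0 then answer + countEqB k d d else answer
      if x < d then answer + countLeB k d (min (d - 1) (2 * d - 3 - x)) else answer) 0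

-- ===== PRECONDITION & SPEC =====
def Spec_solution (k : Int) (d : Int) (out : Int) : Prop := out = solution_alt k d
instance (k : Int) (d : Int) (out : Int) : Decidable (Spec_solution k d out) := by unfold Spec_solution; infer_instance

-- ===== CLAIM (what is proved, stated in full; the proofs are below) =====
def Claim_equal_solution : Prop := ∀ (k : Int) (d : Int), Dom_solution k d → Spec_solution k d (solution k d)

-- ===== LEMMAS AND PROOFS =====

-- counting a threshold predicate (j ≤ hi) over range(0, n)
lemma sum_le_thresh (hi : Int) : ∀ n : Nat,
    ((PySem.List.pyRange 0 (n : Int) 1).map (fun j => if j ≤ hi then (1 : Int) else 0)).sum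
      = max 0 (min (n : Int) (hi + 1)) := by
  intro n
  induction n with
  | zero => simp [PySem.List.pyRange_one_eq_nil]
  | succ n ih =>
      have h : ((n + 1 : Nat) : Int) = (n : Int) + 1 := by push_cast; ring
      rw [h, PySem.List.pyRange_one_succ_right (by positivity)]
      simp only [List.map_append, List.sum_append, ih, List.map_cons, List.map_nil,
        List.sum_cons, List.sum_nil]
      split_ifs with h1 <;> omega

lemma sum_ge_thresh (lo : Int) : ∀ n : Nat,
    ((PySem.List.pyRange 0 (n : Int) 1).map (fun j => if lo ≤ j then (1 : Int) else 0)).sum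
      = max 0 ((n : Int) - max lo 0) := by
  intro n
  induction n with
  | zero => simp [PySem.List.pyRange_one_eq_nil]
  | succ n ih =>
      have h : ((n + 1 : Nat) : Int) = (n : Int) + 1 := by push_cast; ring
      rw [h, PySem.List.pyRange_one_succ_right (by positivity)]
      simp only [List.map_append, List.sum_append, ih, List.map_cons, List.map_nil,
        List.sum_cons, List.sum_nil]
      split_ifs with h1 <;> omega

lemma sum_eq_point (t : Int) : ∀ n : Nat,
    ((PySem.List.pyRange 0 (n : Int) 1).map (fun j => if j = t then (1 : Int) else 0)).sum
      = if 0 ≤ t ∧ t < (n : Int) then 1 else 0 := by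
  intro n
  induction n with
  | zero => simp [PySem.List.pyRange_one_eq_nil]
  | succ n ih =>
      have h : ((n + 1 : Nat) : Int) = (n : Int) + 1 := by push_cast; ring
      rw [h, PySem.List.pyRange_one_succ_right (by positivity)]
      simp only [List.map_append, List.sum_append, ih, List.map_cons, List.map_nil,
        List.sum_cons, List.sum_nil]
      split_ifs <;> omega

lemma sum_false : ∀ n : Nat,
    ((PySem.List.pyRange 0 (n : Int) 1).map (fun _ => (0 : Int))).sum = 0 := by
  intro n; simp

-- characterisation of k*j = c for k ≠ 0
lemma eq_char (k c j : Int) (hk : k ≠ 0) :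
    k * j = c ↔ (PySem.Int.mod c k = 0 ∧ j = PySem.Int.floordiv c k) := by
  constructor
  · rintro rfl
    have hdvd : k ∣ k * j := ⟨j, rfl⟩
    have hmod : PySem.Int.mod (k * j) k = 0 := (PySem.Int.mod_eq_zero_iff_dvd _ _).2 hdvd
    refine ⟨hmod, ?_⟩
    have := PySem.Int.floordiv_mul_add_mod (k * j) k
    rw [hmod] at this
    have : PySem.Int.floordiv (k * j) k * k = j * k := by linarith [this]
    exact (mul_right_cancel₀ hk this.symm)
  · rintro ⟨hmod, rfl⟩
    have := PySem.Int.floordiv_mul_add_mod c k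
    rw [hmod] at this
    linarith [this]

-- characterisation of k*j ≤ m for k > 0
lemma le_char_pos (k m j : Int) (hk : 0 < k) :
    k * j ≤ m ↔ j ≤ PySem.Int.floordiv m k := by
  rw [PySem.Int.le_floordiv_iff_mul_le hk, mul_comm]

-- characterisation of k*j ≤ m for k < 0
lemma le_char_neg (k m j : Int) (hk : k < 0) :
    k * j ≤ m ↔ -(PySem.Int.floordiv (-m) k) ≤ j := by
  have h1 : PySem.Int.floordiv (-m) k = PySem.Int.floordiv m (-k) := by
    have := PySem.Int.floordiv_neg_neg m (-k)
    simpa using this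
  rw [h1]
  have h2 := PySem.Int.le_floordiv_iff_mul_le (a := m) (b := -k) (q := -j) (by omega)
  constructor
  · intro h
    have : -j * -k ≤ m := by nlinarith
    have := h2.2 this
    omega
  · intro h
    have : -j ≤ PySem.Int.floordiv m (-k) := by omega
    have := h2.1 this
    nlinarith

-- Σ_{j=0}^{d} [k*j ≤ m] = countLeB, for 0 ≤ d
lemma sum_countLe (k d m : Int) (hd : 0 ≤ d) :
    ((PySem.List.pyRange 0 (d + 1) 1).map (fun j => if k * j ≤ m then (1 : Int) else 0)).sum
      = countLeB k d m := by
  have hcast : (((d + 1).toNat : Nat) : Int) = d + 1 := by omega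
  rcases lt_trichotomy k 0 with hk | hk | hk
  · have hchar : ∀ j ∈ PySem.List.pyRange 0 (d + 1) 1,
        (if k * j ≤ m then (1 : Int) else 0)
          = (if -(PySem.Int.floordiv (-m) k) ≤ j then (1 : Int) else 0) := by
      intro j _
      simp [le_char_neg k m j hk]
    rw [List.map_congr_left hchar, ← hcast, sum_ge_thresh]
    rw [hcast]
    unfold countLeB
    rw [if_neg (by omega), if_neg (by omega)]
    split_ifs <;> omega
  · subst hk
    unfold countLeB
    rw [if_pos rfl]
    by_cases hm : 0 ≤ m
    · have hchar : ∀ j ∈ PySem.List.pyRange 0 (d + 1) 1,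
          (if (0:Int) * j ≤ m then (1 : Int) else 0) = (if j ≤ d then (1 : Int) else 0) := by
        intro j hj
        rw [if_pos (by simpa using hm)]
        rw [PySem.List.mem_pyRange_one] at hj
        rw [if_pos (by omega)]
      rw [List.map_congr_left hchar, ← hcast, sum_le_thresh, hcast, if_pos hm]
      omega
    · have hchar : ∀ j ∈ PySem.List.pyRange 0 (d + 1) 1,
          (if (0:Int) * j ≤ m then (1 : Int) else 0) = (0 : Int) := by
        intro j _
        rw [if_neg (by simpa using hm)]
      rw [List.map_congr_left hchar, ← hcast, sum_false, if_neg hm]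
  · have hchar : ∀ j ∈ PySem.List.pyRange 0 (d + 1) 1,
        (if k * j ≤ m then (1 : Int) else 0)
          = (if j ≤ PySem.Int.floordiv m k then (1 : Int) else 0) := by
      intro j _
      simp [le_char_pos k m j hk]
    rw [List.map_congr_left hchar, ← hcast, sum_le_thresh, hcast]
    unfold countLeB
    rw [if_neg (by omega), if_pos hk]
    split_ifs <;> omega

-- Σ_{j=0}^{d} [k*j = c] = countEqB, for 0 ≤ d
lemma sum_countEq (k d c : Int) (hd : 0 ≤ d) :
    ((PySem.List.pyRange 0 (d + 1) 1).map (fun j => if k * j = c then (1 : Int) else 0)).sum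
      = countEqB k d c := by
  have hcast : (((d + 1).toNat : Nat) : Int) = d + 1 := by omega
  by_cases hk : k = 0
  · subst hk
    unfold countEqB
    rw [if_pos rfl]
    by_cases hc : c = 0
    · subst hc
      have hchar : ∀ j ∈ PySem.List.pyRange 0 (d + 1) 1,
          (if (0:Int) * j = 0 then (1 : Int) else 0) = (if j ≤ d then (1 : Int) else 0) := by
        intro j hj
        rw [PySem.List.mem_pyRange_one] at hj
        rw [if_pos (by ring), if_pos (by omega)]
      rw [List.map_congr_left hchar, ← hcast, sum_le_thresh, hcast, if_pos rfl]
      omega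
    · have hchar : ∀ j ∈ PySem.List.pyRange 0 (d + 1) 1,
          (if (0:Int) * j = c then (1 : Int) else 0) = (0 : Int) := by
        intro j _
        rw [if_neg (by simpa using fun h => hc h.symm)]
      rw [List.map_congr_left hchar, ← hcast, sum_false, if_neg hc]
  · unfold countEqB
    rw [if_neg hk]
    by_cases hmod : PySem.Int.mod c k = 0
    · have hchar : ∀ j ∈ PySem.List.pyRange 0 (d + 1) 1,
          (if k * j = c then (1 : Int) else 0)
            = (if j = PySem.Int.floordiv c k then (1 : Int) else 0) := by
        intro j _
        simp [eq_char k c j hk, hmod]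
      rw [List.map_congr_left hchar, ← hcast, sum_eq_point, hcast]
      split_ifs <;> omega
    · have hchar : ∀ j ∈ PySem.List.pyRange 0 (d + 1) 1,
          (if k * j = c then (1 : Int) else 0) = (0 : Int) := by
        intro j _
        rw [if_neg (fun h => hmod (((eq_char k c j hk).1 h).1))]
      rw [List.map_congr_left hchar, ← hcast, sum_false]
      rw [if_neg (by tauto)]

-- A's inner loop over j, starting from acc, equals acc + (B's per-i contribution)
lemma inner_loop (k d x : Int) (hd : 0 ≤ d) (acc : Int) :
    (PySem.List.pyRange 0 (d + 1) 1).foldl (fun a j =>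
      let y := k * j
      let a := if (x = d ∧ y = 0) ∨ (x = 0 ∧ y = d) then a + 1 else a
      if x < d ∧ y < d then (if x + y ≤ (d - 1) * 2 - 1 then a + 1 else a) else a) acc
    = acc + ((if x = d then countEqB k d 0 else 0)
          + (if x = 0 ∧ d ≠ 0 then countEqB k d d else 0)
          + (if x < d then countLeB k d (min (d - 1) (2 * d - 3 - x)) else 0)) := by
  have hbody : (PySem.List.pyRange 0 (d + 1) 1).foldl (fun a j =>
      let y := k * j
      let a := if (x = d ∧ y = 0) ∨ (x = 0 ∧ y = d) then a + 1 else a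
      if x < d ∧ y < d then (if x + y ≤ (d - 1) * 2 - 1 then a + 1 else a) else a) acc
    = (PySem.List.pyRange 0 (d + 1) 1).foldl (fun a j => a +
        ((if (x = d ∧ k * j = 0) ∨ (x = 0 ∧ k * j = d) then (1:Int) else 0)
       + (if x < d ∧ k * j < d ∧ x + k * j ≤ (d - 1) * 2 - 1 then (1:Int) else 0))) acc := by
    apply PySem.List.foldl_congr_mem
    intro a j _
    simp only []
    split_ifs <;> omega
  rw [hbody, PySem.List.foldl_add]
  have hsplit := PySem.List.sum_map_add_int (PySem.List.pyRange 0 (d + 1) 1)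
      (fun j => (if (x = d ∧ k * j = 0) ∨ (x = 0 ∧ k * j = d) then (1:Int) else 0))
      (fun j => (if x < d ∧ k * j < d ∧ x + k * j ≤ (d - 1) * 2 - 1 then (1:Int) else 0))
  rw [hsplit]
  have hcast : (((d + 1).toNat : Nat) : Int) = d + 1 := by omega
  have H1 : ((PySem.List.pyRange 0 (d + 1) 1).map (fun j =>
        (if (x = d ∧ k * j = 0) ∨ (x = 0 ∧ k * j = d) then (1:Int) else 0))).sum
      = (if x = d then countEqB k d 0 else 0)
        + (if x = 0 ∧ d ≠ 0 then countEqB k d d else 0) := by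
    by_cases hxd : x = d
    · by_cases hx0 : x = 0
      · have hd0 : d = 0 := by omega
        have hchar : ∀ j ∈ PySem.List.pyRange 0 (d + 1) 1,
            (if (x = d ∧ k * j = 0) ∨ (x = 0 ∧ k * j = d) then (1:Int) else 0)
              = (if k * j = 0 then (1:Int) else 0) := by
          intro j _
          subst hd0; rw [hx0]
          split_ifs <;> tauto
        rw [List.map_congr_left hchar, sum_countEq k d 0 hd,
          if_pos hxd, if_neg (by tauto)]
        ring
      · have hchar : ∀ j ∈ PySem.List.pyRange 0 (d + 1) 1,
            (if (x = d ∧ k * j = 0) ∨ (x = 0 ∧ k * j = d) then (1:Int) else 0)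
              = (if k * j = 0 then (1:Int) else 0) := by
          intro j _
          split_ifs <;> tauto
        rw [List.map_congr_left hchar, sum_countEq k d 0 hd,
          if_pos hxd, if_neg (by tauto)]
        ring
    · by_cases hx0 : x = 0
      · have hdne : d ≠ 0 := by omega
        have hchar : ∀ j ∈ PySem.List.pyRange 0 (d + 1) 1,
            (if (x = d ∧ k * j = 0) ∨ (x = 0 ∧ k * j = d) then (1:Int) else 0)
              = (if k * j = d then (1:Int) else 0) := by
          intro j _
          split_ifs <;> tauto
        rw [List.map_congr_left hchar, sum_countEq k d d hd,
          if_neg hxd, if_pos (by tauto)]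
        ring
      · have hchar : ∀ j ∈ PySem.List.pyRange 0 (d + 1) 1,
            (if (x = d ∧ k * j = 0) ∨ (x = 0 ∧ k * j = d) then (1:Int) else 0) = (0:Int) := by
          intro j _
          rw [if_neg (by tauto)]
        rw [List.map_congr_left hchar, ← hcast, sum_false,
          if_neg hxd, if_neg (by tauto)]
        ring
  have H2 : ((PySem.List.pyRange 0 (d + 1) 1).map (fun j =>
        (if x < d ∧ k * j < d ∧ x + k * j ≤ (d - 1) * 2 - 1 then (1:Int) else 0))).sum
      = (if x < d then countLeB k d (min (d - 1) (2 * d - 3 - x)) else 0) := by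
    by_cases hxlt : x < d
    · have hchar : ∀ j ∈ PySem.List.pyRange 0 (d + 1) 1,
          (if x < d ∧ k * j < d ∧ x + k * j ≤ (d - 1) * 2 - 1 then (1:Int) else 0)
            = (if k * j ≤ min (d - 1) (2 * d - 3 - x) then (1:Int) else 0) := by
        intro j _
        split_ifs <;> omega
      rw [List.map_congr_left hchar, sum_countLe k d _ hd, if_pos hxlt]
    · have hchar : ∀ j ∈ PySem.List.pyRange 0 (d + 1) 1,
          (if x < d ∧ k * j < d ∧ x + k * j ≤ (d - 1) * 2 - 1 then (1:Int) else 0) = (0:Int) := by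
        intro j _
        rw [if_neg (by tauto)]
      rw [List.map_congr_left hchar, ← hcast, sum_false, if_neg hxlt]
  rw [H1, H2]

-- ===== VERDICT (by name: the statement is the Claim_ definition above) =====
theorem solution_spec : Claim_equal_solution := by
  intro k d _
  unfold Spec_solution solution solution_alt
  by_cases hd : d < 0
  · rw [if_pos hd, PySem.List.pyRange_one_eq_nil (by omega)]
    rfl
  · rw [if_neg hd]
    apply PySem.List.foldl_congr_mem
    intro acc i _
    simp only []
    rw [inner_loop k d (k * i) (by omega) acc]
    split_ifs <;> ring
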